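-- pv_equiv track=rewrite | github.com/Siwa12100/cours_s4 | crypto/tp5/tp.py | encodage_ascii
-- ===== SOURCE A (Python) =====
-- def encodage_ascii(chaine):
--     bits_resultats = ""
--
--     for caractere in chaine:
--
--         code_ascii = ord(caractere)
--         bits_caractere = bin(code_ascii)[2:]
--         bits_caractere = '0' * (8 - len(bits_caractere)) + bits_caractere
--         bits_resultats += bits_caractere
--
--     return bits_resultats
-- ===== SOURCE B (Python) =====
-- def encodage_ascii(chaine):
--     morceaux = []
--     for caractere in chaine:
--         code = ord(caractere)
--         if code == 0:
--             bits = "0"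
--         else:
--             bits = ""
--             while code > 0:
--                 code, reste = divmod(code, 2)
--                 bits = ("1" if reste else "0") + bits
--         if len(bits) < 8:
--             bits = "0" * (8 - len(bits)) + bits
--         morceaux.append(bits)
--     return "".join(morceaux)
-- ===== Notes on version B (the rewrite author's own statement) =====
-- stated objective: alternative
-- what changed: B replaces bin(code)[2:] string slicing with a hand-rolled divmod-by-2 loop that prepends bits, pads only when shorter than 8, and joins a list of per-character chunks instead of repeated string concatenation.
import Mathlib
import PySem

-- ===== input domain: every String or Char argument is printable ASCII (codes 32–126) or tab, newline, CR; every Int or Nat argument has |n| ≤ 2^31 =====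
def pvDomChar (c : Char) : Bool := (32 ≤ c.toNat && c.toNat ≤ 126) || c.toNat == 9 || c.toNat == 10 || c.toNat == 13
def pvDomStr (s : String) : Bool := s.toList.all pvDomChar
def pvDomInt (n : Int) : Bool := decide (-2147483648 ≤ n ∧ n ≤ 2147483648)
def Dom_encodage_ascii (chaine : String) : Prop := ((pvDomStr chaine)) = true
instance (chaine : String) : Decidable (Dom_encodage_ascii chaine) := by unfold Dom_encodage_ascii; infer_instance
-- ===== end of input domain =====

-- B builds each character's bits with an explicit divmod loop and joins chunks,
-- instead of A's bin()[2:] slice plus repeated concatenation; same output, same cost.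

-- ===== PORT A =====
-- bin(n)[2:] for n > 0: MSB-first recursion (exact: Python's bin yields these digits)
def pvBinAux : Nat → List Char
  | 0 => []
  | n+1 => pvBinAux ((n+1)/2) ++ [if (n+1) % 2 = 1 then '1' else '0']

-- bin(n)[2:] including bin(0)[2:] = "0"
def pvBin (n : Nat) : List Char := if n = 0 then ['0'] else pvBinAux n

-- '0' * (8 - len(bits)) + bits  (Python's negative repeat is "", matching Nat subtraction)
def encodage_ascii (chaine : String) : String :=
  String.ofList (chaine.toList.foldl
    (fun acc c =>
      let bits := pvBin c.toNat
      acc ++ (List.replicate (8 - bits.length) '0' ++ bits)) [])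

-- ===== PORT B =====
-- while code > 0: prepend the low bit, halve
def pvBitsLoop : Nat → List Char → List Char
  | 0, acc => acc
  | n+1, acc => pvBitsLoop ((n+1)/2) ((if (n+1) % 2 = 1 then '1' else '0') :: acc)

def pvCharChunk (c : Char) : List Char :=
  let code := c.toNat
  let bits := if code = 0 then ['0'] else pvBitsLoop code []
  if bits.length < 8 then List.replicate (8 - bits.length) '0' ++ bits else bits

def encodage_ascii_alt (chaine : String) : String :=
  String.ofList ((chaine.toList.map pvCharChunk).flatten)

-- ===== PRECONDITION & SPEC =====
def Spec_encodage_ascii (chaine : String) (out : String) : Prop := out = encodage_ascii_alt chaine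
instance (chaine : String) (out : String) : Decidable (Spec_encodage_ascii chaine out) := by unfold Spec_encodage_ascii; infer_instance

-- ===== CLAIM (what is proved, stated in full; the proofs are below) =====
def Claim_equal_encodage_ascii : Prop := ∀ (chaine : String), Dom_encodage_ascii chaine → Spec_encodage_ascii chaine (encodage_ascii chaine)

-- ===== LEMMAS AND PROOFS =====
theorem pvBitsLoop_eq (n : Nat) : ∀ acc, pvBitsLoop n acc = pvBinAux n ++ acc := by
  induction n using Nat.strong_induction_on with
  | _ n ih =>
    intro acc
    match n with
    | 0 => simp [pvBitsLoop, pvBinAux]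
    | m+1 =>
      rw [pvBitsLoop, pvBinAux, ih ((m+1)/2) (by omega)]
      simp

theorem chunk_eq (c : Char) :
    List.replicate (8 - (pvBin c.toNat).length) '0' ++ pvBin c.toNat = pvCharChunk c := by
  simp only [pvCharChunk, pvBin, pvBitsLoop_eq, List.append_nil]
  split_ifs with h0 hlt <;> simp_all

theorem foldl_chunks (l : List Char) : ∀ acc,
    l.foldl (fun acc c =>
      let bits := pvBin c.toNat
      acc ++ (List.replicate (8 - bits.length) '0' ++ bits)) acc
      = acc ++ (l.map pvCharChunk).flatten := by
  induction l with
  | nil => simp [List.foldl]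
  | cons c t ih =>
    intro acc
    simp only [List.foldl, List.map, List.flatten]
    rw [ih, chunk_eq, List.append_assoc]
    simp [List.append_eq]

-- ===== VERDICT (by name: the statement is the Claim_ definition above) =====
theorem encodage_ascii_spec : Claim_equal_encodage_ascii := by
  intro chaine _
  unfold Spec_encodage_ascii encodage_ascii encodage_ascii_alt
  rw [foldl_chunks]
  simp
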